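-- pv_equiv track=rewrite | github.com/holderlb/Deep-CWD-IHC | analyze/detect-regions.py | compute_regions_adjacent1
-- ===== SOURCE A (Python) =====
-- def compute_regions_adjacent1(tiles):
--     """Find sets of contiguous tiles."""
--     # Build initial single-tile regions
--     n = len(tiles)
--     region_ids = list(range(n))
--     # Merge regions with pair of adjacent tiles
--     for i in range(n):
--         for j in range(i+1,n):
--             ri = region_ids[i]
--             rj = region_ids[j]
--             if (ri != rj) and (adjacent(tiles[i], tiles[j])):
--                 x1,x2 = ri,rj
--                 if ri > rj:
--                     x1,x2 = rj,ri
--                 for k in range(len(region_ids)):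
--                     if region_ids[k] == x2:
--                         region_ids[k] = x1
--     return region_ids
--
-- def adjacent(tile1, tile2):
--     """Return true if tiles are adjacent, i.e., share a side."""
--     x1,y1,w1,h1 = tile1[:4]
--     x2,y2,w2,h2 = tile2[:4]
--     # tile1 left of tile2
--     if ((x1+w1) == x2) and (y1 == y2):
--         return True
--     # tile1 right of tile2
--     if ((x2+w2) == x1) and (y1 == y2):
--         return True
--     # tile1 above tile2
--     if ((y1+h1) == y2) and (x1 == x2):
--         return True
--     # tile1 below tile2
--     if ((y2+w2) == y1) and (x1 == x2):
--         return True
--     return False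
-- ===== SOURCE B (Python) =====
-- def compute_regions_adjacent1(tiles):
--     """Find sets of contiguous tiles.
--
--     Same pair scan as the original, but instead of rescanning the whole
--     label array on every merge, an inverse index (label -> member list)
--     is maintained, so a merge relabels only the absorbed component.
--     """
--     n = len(tiles)
--     labels = list(range(n))
--     members = {i: [i] for i in range(n)}
--     for i in range(n):
--         for j in range(i + 1, n):
--             li, lj = labels[i], labels[j]
--             if li != lj and _touching(tiles[i], tiles[j]):
--                 lo, hi = (li, lj) if li < lj else (lj, li)
--                 for k in members[hi]:
--                     labels[k] = lo
--                 members[lo].extend(members[hi])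
--                 del members[hi]
--     return labels
--
--
-- def _touching(t1, t2):
--     """Shared-side test (same relation as the original's `adjacent`)."""
--     x1, y1, w1, h1 = t1[:4]
--     x2, y2, w2, h2 = t2[:4]
--     return ((y1 == y2 and (x1 + w1 == x2 or x2 + w2 == x1)) or
--             (x1 == x2 and (y1 + h1 == y2 or y2 + w2 == y1)))
-- ===== Notes on version B (the rewrite author's own statement) =====
-- stated objective: alternative
-- what changed: A merge no longer rescans the entire label array: an inverse index dict (label -> list of member tiles) is maintained so each merge relabels only the absorbed component's members.
import Mathlib
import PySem

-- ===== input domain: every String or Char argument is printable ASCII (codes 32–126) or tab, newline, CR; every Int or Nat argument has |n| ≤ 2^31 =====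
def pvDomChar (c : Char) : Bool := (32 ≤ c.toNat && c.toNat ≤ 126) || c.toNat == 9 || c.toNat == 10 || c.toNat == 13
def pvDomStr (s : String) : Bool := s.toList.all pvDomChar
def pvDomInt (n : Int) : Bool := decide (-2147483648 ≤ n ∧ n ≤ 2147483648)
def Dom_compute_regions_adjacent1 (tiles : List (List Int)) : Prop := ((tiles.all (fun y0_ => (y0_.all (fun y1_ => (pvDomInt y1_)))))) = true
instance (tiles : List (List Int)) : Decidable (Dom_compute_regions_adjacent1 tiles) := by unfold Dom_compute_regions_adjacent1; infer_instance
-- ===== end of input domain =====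

-- B replaces A's full-array rescan per merge by a maintained inverse index (label -> members),
-- so a merge relabels only the absorbed component; same pair scan, same return value.

-- ===== PORT A =====
-- tile1[:4] unpacking; returns false where the Python would raise ValueError (excluded by Pre_)
def adjacentA (tile1 tile2 : List Int) : Bool :=
  match PySem.List.slice tile1 none (some 4), PySem.List.slice tile2 none (some 4) with
  | [x1, y1, w1, h1], [x2, y2, w2, h2] =>
    if x1 + w1 = x2 ∧ y1 = y2 then true
    else if x2 + w2 = x1 ∧ y1 = y2 then true
    else if y1 + h1 = y2 ∧ x1 = x2 then true
    else if y2 + w2 = y1 ∧ x1 = x2 then true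
    else false
  | _, _ => false

-- body of A's inner loop; the relabel scan 'for k: if region_ids[k]==x2: region_ids[k]=x1'
-- is ported elementwise as a map over the list (x1 ≠ x2, so order is irrelevant)
def pvStepA (tiles : List (List Int)) (rs : List Int) (i j : Int) : List Int :=
  let ri := PySem.List.pyGetD rs i 0
  let rj := PySem.List.pyGetD rs j 0
  if ri ≠ rj ∧ adjacentA (PySem.List.pyGetD tiles i []) (PySem.List.pyGetD tiles j []) = true then
    let x1 := if ri > rj then rj else ri
    let x2 := if ri > rj then ri else rj
    rs.map (fun v => if v = x2 then x1 else v)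
  else rs

def compute_regions_adjacent1 (tiles : List (List Int)) : List Int :=
  let n : Int := tiles.length
  (PySem.List.pyRange 0 n).foldl
    (fun rs i => (PySem.List.pyRange (i + 1) n).foldl (fun rs j => pvStepA tiles rs i j) rs)
    (PySem.List.pyRange 0 n)

-- ===== PORT B =====
def touchingB (t1 t2 : List Int) : Bool :=
  match PySem.List.slice t1 none (some 4), PySem.List.slice t2 none (some 4) with
  | [x1, y1, w1, h1], [x2, y2, w2, h2] =>
    decide ((y1 = y2 ∧ (x1 + w1 = x2 ∨ x2 + w2 = x1)) ∨ (x1 = x2 ∧ (y1 + h1 = y2 ∨ y2 + w2 = y1)))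
  | _, _ => false

-- body of B's inner loop; state = (labels, members); members[hi] is ported via get?
-- (the key is always present when this line runs, so Python's KeyError cannot fire)
def pvStepB (tiles : List (List Int)) (s : List Int × PySem.Dict Int (List Nat)) (i j : Int) :
    List Int × PySem.Dict Int (List Nat) :=
  let li := PySem.List.pyGetD s.1 i 0
  let lj := PySem.List.pyGetD s.1 j 0
  if li ≠ lj ∧ touchingB (PySem.List.pyGetD tiles i []) (PySem.List.pyGetD tiles j []) = true then
    let lo := if li < lj then li else lj
    let hi := if li < lj then lj else li
    let mhi := (s.2.get? hi).getD []
    (mhi.foldl (fun ls k => ls.set k lo) s.1,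
     (s.2.modify lo [] (fun L => L ++ mhi)).erase hi)
  else s

def compute_regions_adjacent1_alt (tiles : List (List Int)) : List Int :=
  let n : Int := tiles.length
  let init : List Int × PySem.Dict Int (List Nat) :=
    (PySem.List.pyRange 0 n,
     (PySem.List.pyRange 0 n).foldl (fun d i => d.insert i [i.toNat]) PySem.Dict.empty)
  ((PySem.List.pyRange 0 n).foldl
    (fun s i => (PySem.List.pyRange (i + 1) n).foldl (fun s j => pvStepB tiles s i j) s)
    init).1

-- ===== PRECONDITION & SPEC =====
-- Pre_ excludes exactly the inputs where the Python raises: with two or more tiles, every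
-- tile needs at least 4 entries, else the unpacking 'x,y,w,h = tile[:4]' raises ValueError.
def Pre_compute_regions_adjacent1 (tiles : List (List Int)) : Prop :=
  tiles.length ≤ 1 ∨ ∀ t ∈ tiles, 4 ≤ t.length
instance (tiles : List (List Int)) : Decidable (Pre_compute_regions_adjacent1 tiles) := by
  unfold Pre_compute_regions_adjacent1; infer_instance

def pvWitness_compute_regions_adjacent1 : List (List Int) := [[0, 0, 1, 1], [1, 0, 1, 1], [5, 5, 2, 2]]

def Spec_compute_regions_adjacent1 (tiles : List (List Int)) (out : List Int) : Prop := out = compute_regions_adjacent1_alt tiles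
instance (tiles : List (List Int)) (out : List Int) : Decidable (Spec_compute_regions_adjacent1 tiles out) := by unfold Spec_compute_regions_adjacent1; infer_instance

-- ===== CLAIM (what is proved, stated in full; the proofs are below) =====
def Claim_equal_compute_regions_adjacent1 : Prop := ∀ (tiles : List (List Int)), Dom_compute_regions_adjacent1 tiles → Pre_compute_regions_adjacent1 tiles → Spec_compute_regions_adjacent1 tiles (compute_regions_adjacent1 tiles)

-- ===== LEMMAS AND PROOFS =====

-- the two adjacency tests agree (on every input: both are false on short tiles)
lemma adjacentA_eq_touchingB (t1 t2 : List Int) : adjacentA t1 t2 = touchingB t1 t2 := by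
  unfold adjacentA touchingB
  rcases PySem.List.slice t1 none (some 4) with _ | ⟨x1, _ | ⟨y1, _ | ⟨w1, _ | ⟨h1, _ | ⟨e1, l1⟩⟩⟩⟩⟩ <;>
    rcases PySem.List.slice t2 none (some 4) with _ | ⟨x2, _ | ⟨y2, _ | ⟨w2, _ | ⟨h2, _ | ⟨e2, l2⟩⟩⟩⟩⟩ <;>
      simp <;> apply Bool.eq_iff_iff.mpr <;> simp <;> tauto

-- lookups in an erased dict, at another key
lemma find?_filter_ne {ν : Type} (k k' : Int) (h : k' ≠ k) : ∀ (its : List (Int × ν)),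
    List.find? (fun p => p.1 == k') (its.filter (fun p => !(p.1 == k))) =
      List.find? (fun p => p.1 == k') its := by
  intro its
  induction its with
  | nil => rfl
  | cons p rest ih =>
    have hk : (k == k') = false := beq_eq_false_iff_ne.mpr (Ne.symm h)
    by_cases h1 : p.1 = k
    · have : (p.1 == k') = false := by simp [h1, Ne.symm h]
      simp [h1, List.find?_cons, ih, hk]
    · by_cases h2 : p.1 = k' <;> simp [List.filter_cons, List.find?_cons, h1, h2, ih, h]


lemma get?_erase_of_ne {ν : Type} (d : PySem.Dict Int ν) (k k' : Int) (h : k' ≠ k) :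
    (d.erase k).get? k' = d.get? k' := by
  rcases d with ⟨items⟩
  simp only [PySem.Dict.erase, PySem.Dict.get?]
  rw [find?_filter_ne k k' h]

lemma getD_erase_of_ne {ν : Type} (d : PySem.Dict Int ν) (k k' : Int) (d0 : ν) (h : k' ≠ k) :
    (d.erase k).getD k' d0 = d.getD k' d0 := by
  simp [PySem.Dict.getD_eq_get?_getD, get?_erase_of_ne d k k' h]

-- a fold writing x1 at a set of positions, described positionwise
lemma foldl_set_getElem? (L : List Nat) (x1 : Int) :
    ∀ (rs : List Int) (p : Nat),
      (L.foldl (fun ls k => ls.set k x1) rs)[p]? =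
        if p ∈ L ∧ p < rs.length then some x1 else rs[p]? := by
  induction L with
  | nil => intro rs p; simp
  | cons a L ih =>
    intro rs p
    simp only [List.foldl_cons]
    rw [ih]
    simp only [List.length_set, List.getElem?_set, List.mem_cons]
    by_cases hpl : p ∈ L <;> by_cases hpa : a = p <;> by_cases hlen : p < rs.length <;>
      simp_all <;> omega

-- when L is exactly the set of positions holding x2, the fold equals A's elementwise rewrite
lemma foldl_set_eq_map (rs : List Int) (L : List Nat) (x1 x2 : Int)
    (hL : ∀ k : Nat, k ∈ L ↔ rs[k]? = some x2) :
    L.foldl (fun ls k => ls.set k x1) rs = rs.map (fun v => if v = x2 then x1 else v) := by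
  apply List.ext_getElem?
  intro p
  rw [foldl_set_getElem?, List.getElem?_map]
  rcases hp : rs[p]? with _ | v
  · have : ¬ p < rs.length := by simpa [List.getElem?_eq_none_iff] using hp
    simp [this]
  · have hlen : p < rs.length := (List.getElem?_eq_some_iff.mp hp).1
    have hmem : p ∈ L ↔ v = x2 := by rw [hL p, hp]; simp
    by_cases hv : v = x2 <;> simp [hmem, hv, hlen]

-- the relational invariant between A's state and B's state
def pvMInv (rs : List Int) (m : PySem.Dict Int (List Nat)) : Prop :=
  ∀ l ∈ rs, ∀ k : Nat, (k ∈ m.getD l [] ↔ rs[k]? = some l)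

def pvR (tiles : List (List Int)) (rs : List Int) (s : List Int × PySem.Dict Int (List Nat)) : Prop :=
  s.1 = rs ∧ rs.length = tiles.length ∧ pvMInv rs s.2

-- folding two related step functions over the same list preserves a relation
lemma foldl_rel {α β γ : Type} (R : α → β → Prop) (f : α → γ → α) (g : β → γ → β)
    (l : List γ) (h : ∀ x ∈ l, ∀ s t, R s t → R (f s x) (g t x)) :
    ∀ s t, R s t → R (l.foldl f s) (l.foldl g t) := by
  induction l with
  | nil => intro s t hst; simpa using hst
  | cons a l ih =>
    intro s t hst
    simp only [List.foldl_cons]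
    exact ih (fun x hx => h x (List.mem_cons_of_mem _ hx)) _ _ (h a (List.mem_cons_self) s t hst)

-- a single merge: A's elementwise rewrite b ↦ a corresponds to B's indexed relabel + dict update
lemma merge_rel (tiles : List (List Int)) (rs : List Int) (m : PySem.Dict Int (List Nat))
    (hlen : rs.length = tiles.length) (hM : pvMInv rs m)
    (a b : Int) (hab : a ≠ b) (ha : a ∈ rs) (hb : b ∈ rs) :
    pvR tiles (rs.map (fun v => if v = b then a else v))
      (((m.get? b).getD []).foldl (fun ls k => ls.set k a) rs,
       (m.modify a [] (fun L => L ++ (m.get? b).getD [])).erase b) := by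
  have hmb : (m.get? b).getD [] = m.getD b [] := (PySem.Dict.getD_eq_get?_getD m b []).symm
  have hchb := hM b hb
  have hcha := hM a ha
  refine ⟨?_, by simpa using hlen, ?_⟩
  · rw [hmb]
    exact foldl_set_eq_map rs _ a b hchb
  · intro l hl k
    obtain ⟨v, hv, hfv⟩ := List.mem_map.mp hl
    by_cases hla : l = a
    · subst hla
      rw [getD_erase_of_ne _ _ _ _ hab, PySem.Dict.getD_modify_self, hmb, List.getElem?_map]
      constructor
      · intro hk
        rcases List.mem_append.mp hk with hk1 | hk2
        · rw [(hcha k).mp hk1]; simp [hab]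
        · rw [(hchb k).mp hk2]; simp
      · intro hk
        rcases hrk : rs[k]? with _ | w
        · rw [hrk] at hk; simp at hk
        · rw [hrk] at hk
          simp only [Option.map_some, Option.some.injEq] at hk
          by_cases hwb : w = b
          · exact List.mem_append.mpr (Or.inr ((hchb k).mpr (by rw [hrk, hwb])))
          · rw [if_neg hwb] at hk
            exact List.mem_append.mpr (Or.inl ((hcha k).mpr (by rw [hrk, hk])))
    · have hvb : v ≠ b := fun hh => hla (by rw [← hfv, if_pos hh])
      have hlv : l = v := by rw [← hfv, if_neg hvb]
      subst hlv
      rw [getD_erase_of_ne _ _ _ _ hvb, PySem.Dict.getD_modify_of_ne _ _ _ hla,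
          List.getElem?_map]
      rw [hM l hv k]
      constructor
      · intro hk
        rw [hk]; simp [hvb]
      · intro hk
        rcases hrk : rs[k]? with _ | w
        · rw [hrk] at hk; simp at hk
        · rw [hrk] at hk
          simp only [Option.map_some, Option.some.injEq] at hk
          by_cases hwb : w = b
          · rw [if_pos hwb] at hk; exact absurd hk.symm hla
          · rw [if_neg hwb] at hk; rw [hk]

lemma step_rel (tiles : List (List Int)) (i j : Int)
    (hi0 : 0 ≤ i) (hin : i < (tiles.length : Int)) (hj0 : 0 ≤ j) (hjn : j < (tiles.length : Int)) :
    ∀ rs s, pvR tiles rs s → pvR tiles (pvStepA tiles rs i j) (pvStepB tiles s i j) := by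
  intro rs s hR
  obtain ⟨hs1, hlen, hM⟩ := hR
  have hiN : i.toNat < rs.length := by omega
  have hjN : j.toNat < rs.length := by omega
  have hgi : PySem.List.pyGetD rs i 0 = rs[i.toNat] := by
    rw [PySem.List.pyGetD_of_nonneg rs 0 hi0, List.getD_eq_getElem?_getD,
        List.getElem?_eq_getElem hiN]
    rfl
  have hgj : PySem.List.pyGetD rs j 0 = rs[j.toNat] := by
    rw [PySem.List.pyGetD_of_nonneg rs 0 hj0, List.getD_eq_getElem?_getD,
        List.getElem?_eq_getElem hjN]
    rfl
  have hmi : PySem.List.pyGetD rs i 0 ∈ rs := by rw [hgi]; exact List.getElem_mem hiN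
  have hmj : PySem.List.pyGetD rs j 0 ∈ rs := by rw [hgj]; exact List.getElem_mem hjN
  simp only [pvStepA, pvStepB, hs1, adjacentA_eq_touchingB]
  by_cases hc : PySem.List.pyGetD rs i 0 ≠ PySem.List.pyGetD rs j 0 ∧
      touchingB (PySem.List.pyGetD tiles i []) (PySem.List.pyGetD tiles j []) = true
  · rw [if_pos hc, if_pos hc]
    obtain ⟨hne, -⟩ := hc
    rcases lt_trichotomy (PySem.List.pyGetD rs i 0) (PySem.List.pyGetD rs j 0) with hlt | heq | hgt
    · simp only [gt_iff_lt, if_neg (lt_asymm hlt), if_pos hlt]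
      exact merge_rel tiles rs s.2 hlen hM _ _ hne hmi hmj
    · exact absurd heq hne
    · simp only [gt_iff_lt, if_pos hgt, if_neg (lt_asymm hgt)]
      exact merge_rel tiles rs s.2 hlen hM _ _ (Ne.symm hne) hmj hmi
  · rw [if_neg hc, if_neg hc]
    exact ⟨hs1, hlen, hM⟩

-- the initial states are related
lemma init_rel (tiles : List (List Int)) :
    pvR tiles (PySem.List.pyRange 0 (tiles.length : Int))
      (PySem.List.pyRange 0 (tiles.length : Int),
       (PySem.List.pyRange 0 (tiles.length : Int)).foldl
         (fun d i => d.insert i [i.toNat]) PySem.Dict.empty) := by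
  refine ⟨rfl, by simp [PySem.List.length_pyRange_one], ?_⟩
  intro l hl k
  have hlb := PySem.List.mem_pyRange_one.mp hl
  have hitems : ((PySem.List.pyRange 0 (tiles.length : Int)).foldl
      (fun d i => d.insert i [i.toNat]) PySem.Dict.empty).items =
      (PySem.List.pyRange 0 (tiles.length : Int)).map (fun a => (a, [a.toNat])) := by
    have := PySem.Dict.items_foldl_insert_fresh (PySem.List.pyRange 0 (tiles.length : Int))
      (fun a => a) (fun a => [a.toNat]) PySem.Dict.empty
      (by intro a _; simp [PySem.Dict.contains_empty])
      (by simpa using PySem.List.nodup_pyRange_one 0 (tiles.length : Int))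
    simpa using this
  have hnd : ((PySem.List.pyRange 0 (tiles.length : Int)).foldl
      (fun d i => d.insert i [i.toNat]) PySem.Dict.empty).keys.Nodup :=
    PySem.Dict.nodup_keys_foldl_insert _ _ _ PySem.Dict.nodup_keys_empty
  have hgetD : ((PySem.List.pyRange 0 (tiles.length : Int)).foldl
      (fun d i => d.insert i [i.toNat]) PySem.Dict.empty).getD l [] = [l.toNat] := by
    apply PySem.Dict.getD_of_mem_items _ _ hnd
    rw [hitems]
    exact List.mem_map.mpr ⟨l, hl, rfl⟩
  rw [hgetD, PySem.List.getElem?_pyRange_one]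
  constructor
  · intro hk
    have hkl : k = l.toNat := by simpa using hk
    have : (k : Int) < (tiles.length : Int) := by omega
    simp only [hkl]
    rw [if_pos (by omega)]
    simp
    omega
  · intro hk
    by_cases hklt : k < ((tiles.length : Int) - 0).toNat
    · rw [if_pos hklt] at hk
      have : l = (k : Int) := by simpa using hk.symm
      simp [this]
    · rw [if_neg hklt] at hk
      exact absurd hk (by simp)

-- ===== VERDICT (by name: the statement is the Claim_ definition above) =====
theorem compute_regions_adjacent1_spec : Claim_equal_compute_regions_adjacent1 := by
  intro tiles _ _
  unfold Spec_compute_regions_adjacent1 compute_regions_adjacent1 compute_regions_adjacent1_alt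
  have h := foldl_rel (pvR tiles)
    (fun rs i => (PySem.List.pyRange (i + 1) (tiles.length : Int)).foldl
      (fun rs j => pvStepA tiles rs i j) rs)
    (fun s i => (PySem.List.pyRange (i + 1) (tiles.length : Int)).foldl
      (fun s j => pvStepB tiles s i j) s)
    (PySem.List.pyRange 0 (tiles.length : Int))
    (by
      intro x hx s t hst
      have hxb := PySem.List.mem_pyRange_one.mp hx
      exact foldl_rel (pvR tiles) _ _ _
        (by
          intro y hy s' t' hst'
          have hyb := PySem.List.mem_pyRange_one.mp hy
          exact step_rel tiles x y hxb.1 hxb.2 (by omega) hyb.2 s' t' hst') s t hst)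
    _ _ (init_rel tiles)
  exact h.1.symm
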